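-- pv_equiv track=rewrite | github.com/aOriginalUsernam/orbital_scan | orbital_scan.py | check_if_highest
-- ===== SOURCE A (Python) =====
-- def check_if_highest(
--     data_2D_format: list[list[bool]], row_id: int, column_id: int
-- ) -> bool:
--     if row_id + 1 == len(data_2D_format):
--         return True
--     elif not data_2D_format[row_id + 1][column_id]:
--         return False
--     return check_if_highest(data_2D_format, row_id + 1, column_id)
-- ===== SOURCE B (Python) =====
-- def check_if_highest(
--     data_2D_format: list[list[bool]], row_id: int, column_id: int
-- ) -> bool:
--     n = len(data_2D_format)
--     if row_id + 1 == n: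
--         return True
--     if not data_2D_format[row_id + 1][column_id]:
--         return False
--     return all(data_2D_format[r][column_id] for r in range(row_id + 2, n))
-- ===== Notes on version B (the rewrite author's own statement) =====
-- stated objective: idiomatic
-- what changed: Replaces the tail recursion with a short-circuit check of the row immediately below followed by an all(...) over the remaining rows' column values; no recursive calls.
import Mathlib
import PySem

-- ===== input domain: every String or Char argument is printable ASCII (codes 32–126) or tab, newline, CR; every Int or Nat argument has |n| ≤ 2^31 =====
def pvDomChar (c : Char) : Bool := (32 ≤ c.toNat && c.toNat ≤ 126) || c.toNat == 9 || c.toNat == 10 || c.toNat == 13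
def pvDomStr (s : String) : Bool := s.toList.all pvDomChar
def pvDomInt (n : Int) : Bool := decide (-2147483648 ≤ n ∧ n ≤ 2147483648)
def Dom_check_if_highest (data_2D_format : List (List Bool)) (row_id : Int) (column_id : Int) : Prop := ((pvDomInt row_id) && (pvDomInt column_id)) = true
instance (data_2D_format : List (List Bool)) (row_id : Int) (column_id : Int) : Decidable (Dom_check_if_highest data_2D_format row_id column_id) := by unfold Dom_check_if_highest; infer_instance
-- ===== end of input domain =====

-- B replaces A's tail recursion with a short-circuit check of the row immediately below
-- followed by an all(...) over the remaining rows' column values; objective: idiomatic, same cost.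


-- ===== PORT A =====
-- literal transliteration of A's tail recursion; 'none' from pyGet? = Python IndexError,
-- rendered as 'false' (A raises exactly outside Pre_, where nothing is claimed)
def check_if_highest (data_2D_format : List (List Bool)) (row_id : Int) (column_id : Int) : Bool :=
  if row_id + 1 = (data_2D_format.length : Int) then true
  else
    match h : PySem.List.pyGet? data_2D_format (row_id + 1) with
    | none => false      -- IndexError in Python
    | some row =>
      match PySem.List.pyGet? row column_id with
      | none => false    -- IndexError in Python
      | some b =>
        if !b then false
        else check_if_highest data_2D_format (row_id + 1) column_id
termination_by ((data_2D_format.length : Int) - row_id).toNat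
decreasing_by
  have hin : PySem.Raise.InRange data_2D_format.length (row_id + 1) := by
    by_contra hc
    rw [← PySem.List.pyGet?_eq_none_iff] at hc
    simp [hc] at h
  unfold PySem.Raise.InRange at hin
  omega

-- ===== PORT B =====
-- the generator 'all(data_2D_format[r][column_id] for r in range(row_id + 2, n))':
-- structural recursion on the materialized index list; each element access is the
-- Option-composition of the two indexings (none = IndexError, rendered 'false' as in port A),
-- and '&&' is all()'s short-circuit at the first False
def pvAll (data_2D_format : List (List Bool)) (column_id : Int) : List Int → Bool
  | [] => true
  | r :: rs =>
    match (PySem.List.pyGet? data_2D_format r).bind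
            (fun row => PySem.List.pyGet? row column_id) with
    | none => false      -- IndexError in Python
    | some b => b && pvAll data_2D_format column_id rs

def check_if_highest_alt (data_2D_format : List (List Bool)) (row_id : Int) (column_id : Int) : Bool :=
  let n : Int := (data_2D_format.length : Int)
  if row_id + 1 = n then true
  else
    match (PySem.List.pyGet? data_2D_format (row_id + 1)).bind
            (fun row => PySem.List.pyGet? row column_id) with
    | none => false      -- IndexError in Python
    | some b =>
      if !b then false
      else pvAll data_2D_format column_id (PySem.List.pyRange (row_id + 2) n 1)

-- ===== PRECONDITION & SPEC =====
-- column_id is a valid (possibly negative) Python index for the given row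
def pvColOk (column_id : Int) (row : List Bool) : Bool :=
  decide (-(row.length : Int) ≤ column_id) && decide (column_id < (row.length : Int))

-- scan position r is safe: either its row has the column, or an earlier scanned row (index ≥ lo)
-- already holds False at the column, so Python returns before reaching r
def pvRowOk (data_2D_format : List (List Bool)) (column_id lo r : Int) : Bool :=
  pvColOk column_id (PySem.List.pyGetD data_2D_format r []) ||
  (PySem.List.pyRange lo r 1).any (fun r' =>
    pvColOk column_id (PySem.List.pyGetD data_2D_format r' []) &&
    !(PySem.List.pyGetD (PySem.List.pyGetD data_2D_format r' []) column_id true))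

-- exactly the inputs on which the Python A returns normally, i.e. no IndexError during the scan
def Pre_check_if_highest (data_2D_format : List (List Bool)) (row_id : Int) (column_id : Int) : Prop :=
  row_id + 1 = (data_2D_format.length : Int) ∨
  (-(data_2D_format.length : Int) ≤ row_id + 1 ∧ row_id + 1 < (data_2D_format.length : Int) ∧
   (PySem.List.pyRange (row_id + 1) (data_2D_format.length : Int) 1).all
     (pvRowOk data_2D_format column_id (row_id + 1)) = true)
instance (data_2D_format : List (List Bool)) (row_id : Int) (column_id : Int) : Decidable (Pre_check_if_highest data_2D_format row_id column_id) := by unfold Pre_check_if_highest; infer_instance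

def pvWitness_check_if_highest : List (List Bool) × Int × Int := ([[true], [true]], 0, 0)

def Spec_check_if_highest (data_2D_format : List (List Bool)) (row_id : Int) (column_id : Int) (out : Bool) : Prop := out = check_if_highest_alt data_2D_format row_id column_id
instance (data_2D_format : List (List Bool)) (row_id : Int) (column_id : Int) (out : Bool) : Decidable (Spec_check_if_highest data_2D_format row_id column_id out) := by unfold Spec_check_if_highest; infer_instance

-- ===== CLAIM (what is proved, stated in full; the proofs are below) =====
def Claim_equal_check_if_highest : Prop := ∀ (data_2D_format : List (List Bool)) (row_id : Int) (column_id : Int), Dom_check_if_highest data_2D_format row_id column_id → Pre_check_if_highest data_2D_format row_id column_id → Spec_check_if_highest data_2D_format row_id column_id (check_if_highest data_2D_format row_id column_id)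

-- ===== LEMMAS AND PROOFS =====
lemma pyGet?_inRange_of_some {α : Type} (xs : List α) (i : Int) (x : α)
    (h : PySem.List.pyGet? xs i = some x) : PySem.Raise.InRange xs.length i := by
  by_contra hc
  rw [← PySem.List.pyGet?_eq_none_iff] at hc
  simp [hc] at h

-- A's recursion from row rid equals all() over the index range (rid+1, len)
lemma key (data : List (List Bool)) (col : Int) :
    ∀ (fuel : Nat) (rid : Int), ((data.length : Int) - rid).toNat ≤ fuel →
      rid + 1 ≤ (data.length : Int) →
      check_if_highest data rid col =
        pvAll data col (PySem.List.pyRange (rid + 1) (data.length : Int) 1) := by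
  intro fuel
  induction fuel with
  | zero =>
    intro rid hf hle
    have hend : rid + 1 = (data.length : Int) := by omega
    rw [check_if_highest, if_pos hend, hend, PySem.List.pyRange_one_eq_nil (le_refl _), pvAll]
  | succ n ih =>
    intro rid hf hle
    by_cases hend : rid + 1 = (data.length : Int)
    · rw [check_if_highest, if_pos hend, hend, PySem.List.pyRange_one_eq_nil (le_refl _), pvAll]
    · have hlt : rid + 1 < (data.length : Int) := by omega
      rw [check_if_highest, if_neg hend, PySem.List.pyRange_one_cons hlt, pvAll]
      cases hget : PySem.List.pyGet? data (rid + 1) with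
      | none => simp [hget]
      | some row =>
        simp only [hget, Option.bind_some]
        cases hcol : PySem.List.pyGet? row col with
        | none => simp [hcol]
        | some b =>
          simp only [hcol]
          cases b with
          | false => simp
          | true =>
            simp only [Bool.not_true, Bool.false_eq_true, if_false, Bool.true_and]
            exact ih (rid + 1) (by omega) (by omega)

-- ===== VERDICT (by name: the statement is the Claim_ definition above) =====
theorem check_if_highest_spec : Claim_equal_check_if_highest := by
  intro data rid col _ hpre
  unfold Spec_check_if_highest check_if_highest_alt
  have hle : rid + 1 ≤ (data.length : Int) := by
    rcases hpre with h | ⟨_, h2, _⟩ <;> omega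
  by_cases hend : rid + 1 = (data.length : Int)
  · rw [check_if_highest, if_pos hend]; simp [hend]
  · have hlt : rid + 1 < (data.length : Int) := by omega
    rw [check_if_highest, if_neg hend]
    simp only [if_neg hend]
    cases hget : PySem.List.pyGet? data (rid + 1) with
    | none => simp [hget]
    | some row =>
      simp only [hget, Option.bind_some]
      cases hcol : PySem.List.pyGet? row col with
      | none => simp [hcol]
      | some b =>
        simp only [hcol]
        cases b with
        | false => simp
        | true =>
          simp only [Bool.not_true, Bool.false_eq_true, if_false]
          have := pyGet?_inRange_of_some data (rid + 1) row hget
          unfold PySem.Raise.InRange at this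
          have h2 : (rid + 1) + 1 ≤ (data.length : Int) := by omega
          have := key data col ((data.length : Int) - (rid + 1)).toNat (rid + 1) (le_refl _) h2
          rw [this, show rid + 1 + 1 = rid + 2 by ring]
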